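-- pv_equiv track=rewrite | github.com/bulatkh/csshar_tfa | probing.py | extract_test_activities
-- ===== SOURCE A (Python) =====
-- import itertools
--
-- def extract_test_activities(act_to_type):
--     type_to_act = {}
--     for act, type_ in act_to_type.items():
--         if type_ not in type_to_act:
--             type_to_act[type_] = [act]
--         else:
--             type_to_act[type_].append(act)
--     grouped_activities = list(type_to_act.values())
--     return list(itertools.product(*grouped_activities))
-- ===== SOURCE B (Python) =====
-- def extract_test_activities(act_to_type):
--     type_to_act = {}
--     for act, type_ in act_to_type.items():
--         type_to_act.setdefault(type_, []).append(act)
--     grouped_activities = list(type_to_act.values())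
--     n = len(grouped_activities)
--     sizes = [len(g) for g in grouped_activities]
--     total = 1
--     for s in sizes:
--         total *= s
--     result = []
--     for i in range(total):
--         idx = i
--         tup = [None] * n
--         for j in range(n - 1, -1, -1):
--             idx, r = divmod(idx, sizes[j])
--             tup[j] = grouped_activities[j][r]
--         result.append(tuple(tup))
--     return result
-- ===== Notes on version B (the rewrite author's own statement) =====
-- stated objective: alternative
-- what changed: Keeps the group-by (via setdefault) but replaces itertools.product over the groups with an explicit mixed-radix enumeration: each index i < prod(sizes) is decoded into one position per group (last group least significant), reproducing product's rightmost-fastest order.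
import Mathlib
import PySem

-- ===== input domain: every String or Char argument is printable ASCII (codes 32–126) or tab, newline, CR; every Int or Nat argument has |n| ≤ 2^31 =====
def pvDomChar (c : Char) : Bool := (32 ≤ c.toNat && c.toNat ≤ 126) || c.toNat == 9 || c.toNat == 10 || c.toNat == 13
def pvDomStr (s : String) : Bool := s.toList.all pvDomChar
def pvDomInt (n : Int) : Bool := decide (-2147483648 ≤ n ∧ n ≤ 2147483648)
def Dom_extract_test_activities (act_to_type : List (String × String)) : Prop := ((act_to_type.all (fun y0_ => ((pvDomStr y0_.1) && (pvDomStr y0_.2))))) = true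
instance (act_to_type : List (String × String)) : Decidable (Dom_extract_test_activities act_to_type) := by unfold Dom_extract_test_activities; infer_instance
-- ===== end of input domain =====

-- B replaces itertools.product over the value groups by a mixed-radix index enumeration
-- (decode each i < ∏ sizes into one index per group, last group least significant);
-- objective: alternative algorithm, same ordering and edge cases, similar cost.

-- ===== PORT A =====
-- dict building loop, then list(itertools.product(*groups)) transliterated as the
-- standard left fold 'result = [t + [x] for t in result for x in pool]'.
def extract_test_activities (act_to_type : List (String × String)) : List (List String) :=
  let type_to_act : PySem.Dict String (List String) :=
    act_to_type.foldl (fun d p =>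
      if d.contains p.2 = false then d.insert p.2 [p.1]
      else d.modify p.2 [] (· ++ [p.1])) PySem.Dict.empty
  let grouped_activities := type_to_act.values
  grouped_activities.foldl (fun acc g => acc.flatMap (fun t => g.map (fun x => t ++ [x]))) [[]]

-- ===== PORT B =====
-- setdefault(type_, []).append(act) is d[k] = d.get(k, []) + [act], i.e. Dict.modify.
def extract_test_activities_alt (act_to_type : List (String × String)) : List (List String) :=
  let type_to_act : PySem.Dict String (List String) :=
    act_to_type.foldl (fun d p => d.modify p.2 [] (· ++ [p.1])) PySem.Dict.empty
  let gs := type_to_act.values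
  let total := (gs.map List.length).foldl (· * ·) 1
  (List.range total).map (fun i =>
    (gs.foldr (fun g st => (st.1 / g.length, g.getD (st.1 % g.length) "" :: st.2))
      (i, ([] : List String))).2)

-- ===== PRECONDITION & SPEC =====
def Spec_extract_test_activities (act_to_type : List (String × String)) (out : List (List String)) : Prop := out = extract_test_activities_alt act_to_type
instance (act_to_type : List (String × String)) (out : List (List String)) : Decidable (Spec_extract_test_activities act_to_type out) := by unfold Spec_extract_test_activities; infer_instance

-- ===== CLAIM (what is proved, stated in full; the proofs are below) =====
def Claim_equal_extract_test_activities : Prop := ∀ (act_to_type : List (String × String)), Dom_extract_test_activities act_to_type → Spec_extract_test_activities act_to_type (extract_test_activities act_to_type)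

-- ===== LEMMAS AND PROOFS =====

-- cons-structured Cartesian product, the common reference point of both ports
def cprod : List (List String) → List (List String)
  | [] => [[]]
  | g :: gs => g.flatMap (fun x => (cprod gs).map (x :: ·))

-- the mixed-radix decoder of port B, in recursive form
def pvDec : List (List String) → Nat → Nat × List String
  | [], i => (i, [])
  | g :: gs, i =>
    let st := pvDec gs i
    (st.1 / g.length, g.getD (st.1 % g.length) "" :: st.2)

lemma pvDec_foldr (gs : List (List String)) (i : Nat) :
    gs.foldr (fun g st => (st.1 / g.length, g.getD (st.1 % g.length) "" :: st.2))
      (i, ([] : List String)) = pvDec gs i := by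
  induction gs with
  | nil => rfl
  | cons g gs ih => rw [List.foldr_cons, ih]; rfl

-- A's two grouping branches coincide with B's single modify step
lemma dict_fold_eq (l : List (String × String)) (d : PySem.Dict String (List String)) :
    l.foldl (fun d p =>
      if d.contains p.2 = false then d.insert p.2 [p.1]
      else d.modify p.2 [] (· ++ [p.1])) d
    = l.foldl (fun d p => d.modify p.2 [] (· ++ [p.1])) d := by
  induction l generalizing d with
  | nil => rfl
  | cons p l ih =>
    simp only [List.foldl_cons]
    rw [← ih]
    congr 1
    by_cases h : d.contains p.2
    · simp [h]
    · simp only [Bool.not_eq_true] at h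
      simp only [h, if_pos]
      show d.insert p.2 [p.1] = d.insert p.2 (d.getD p.2 [] ++ [p.1])
      rw [PySem.Dict.getD_of_not_contains (h := h)]
      rfl

-- A's foldl-product equals the cons-structured product
lemma foldl_prod_general (gs : List (List String)) (acc : List (List String)) :
    gs.foldl (fun acc g => acc.flatMap (fun t => g.map (fun x => t ++ [x]))) acc
    = acc.flatMap (fun t => (cprod gs).map (t ++ ·)) := by
  induction gs generalizing acc with
  | nil => simp [cprod]
  | cons g gs ih =>
    simp only [List.foldl_cons, ih, cprod]
    simp [List.flatMap_assoc, List.map_flatMap, List.flatMap_map, Function.comp_def,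
      List.append_assoc]

lemma A_prod_eq (gs : List (List String)) :
    gs.foldl (fun acc g => acc.flatMap (fun t => g.map (fun x => t ++ [x]))) [[]]
    = cprod gs := by
  rw [foldl_prod_general]; simp

-- first component of the decoder state
lemma pvDec_fst (gs : List (List String)) (i : Nat) :
    (pvDec gs i).1 = i / (gs.map List.length).prod := by
  induction gs generalizing i with
  | nil => simp [pvDec]
  | cons g gs ih =>
    simp [pvDec, ih, Nat.div_div_eq_div_mul, Nat.mul_comm]

-- the decoded tuple only depends on i modulo the total size
lemma pvDec_snd_mod (gs : List (List String)) (i : Nat) :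
    (pvDec gs (i % (gs.map List.length).prod)).2 = (pvDec gs i).2 := by
  induction gs generalizing i with
  | nil => rfl
  | cons g gs ih =>
    have hdvd : (gs.map List.length).prod ∣ (((g :: gs).map List.length).prod) := by
      simp [List.map_cons, List.prod_cons]
    simp only [pvDec, pvDec_fst]
    congr 1
    · congr 1
      rw [List.map_cons, List.prod_cons, Nat.mul_comm, Nat.mod_mul_right_div_self]
      exact Nat.mod_mod_of_dvd _ dvd_rfl
    · rw [← ih i]
      have h3 : i % (((g :: gs).map List.length).prod) % (gs.map List.length).prod
          = i % (gs.map List.length).prod := Nat.mod_mod_of_dvd i hdvd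
      rw [← h3]
      exact (ih _).symm

-- range of a product decomposes into nested ranges
lemma range_mul_flatMap (m t : Nat) :
    List.range (m * t) = (List.range m).flatMap (fun q => (List.range t).map (fun r => q * t + r)) := by
  induction m with
  | zero => simp
  | succ m ih =>
    rw [Nat.succ_mul, List.range_add, ih, List.range_succ]
    simp [List.flatMap_append]

-- a list is the range-map of its getD
lemma map_range_getD (g : List String) :
    (List.range g.length).map (fun q => g.getD q "") = g := by
  apply List.ext_getElem
  · simp
  · intro i h1 h2
    simp [List.getD_eq_getElem?_getD, List.getElem?_eq_getElem h2]

-- B's enumeration produces exactly the cons-structured product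
lemma B_enum_eq (gs : List (List String)) :
    (List.range ((gs.map List.length).prod)).map (fun i => (pvDec gs i).2) = cprod gs := by
  induction gs with
  | nil => rfl
  | cons g gs ih =>
    simp only [List.map_cons, List.prod_cons, cprod]
    rw [range_mul_flatMap, List.map_flatMap]
    conv_rhs => rw [← map_range_getD g, ← ih]
    rw [List.flatMap_map, List.flatMap_def, List.flatMap_def]
    apply congrArg List.flatten
    apply List.map_congr_left
    intro q hq
    rw [List.mem_range] at hq
    simp only [List.map_map]
    apply List.map_congr_left
    intro r hr
    rw [List.mem_range] at hr
    have ht : 0 < (gs.map List.length).prod := Nat.lt_of_le_of_lt (Nat.zero_le r) hr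
    have h1 : (q * (gs.map List.length).prod + r) / (gs.map List.length).prod = q := by
      rw [Nat.add_comm, Nat.add_mul_div_right _ _ ht, Nat.div_eq_of_lt hr]
      simp
    have h2 : (pvDec gs (q * (gs.map List.length).prod + r)).2 = (pvDec gs r).2 := by
      have h3 : (q * (gs.map List.length).prod + r) % (gs.map List.length).prod = r := by
        rw [Nat.add_comm, Nat.add_mul_mod_self_right, Nat.mod_eq_of_lt hr]
      rw [← pvDec_snd_mod gs (q * (gs.map List.length).prod + r), h3]
    simp only [pvDec, pvDec_fst, h1, h2, Function.comp_def]
    rw [Nat.mod_eq_of_lt hq]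

-- ===== VERDICT (by name: the statement is the Claim_ definition above) =====
theorem extract_test_activities_spec : Claim_equal_extract_test_activities := by
  intro l _
  show _ = _
  simp only [extract_test_activities, extract_test_activities_alt]
  rw [dict_fold_eq]
  generalize (l.foldl (fun d p => d.modify p.2 [] (· ++ [p.1]))
    (PySem.Dict.empty : PySem.Dict String (List String))).values = gs
  rw [A_prod_eq, ← List.prod_eq_foldl, ← B_enum_eq]
  apply List.map_congr_left
  intro i _
  rw [pvDec_foldr]
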